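-- pv_equiv track=rewrite | github.com/pypi-data/pypi-mirror-255 | packages/pq-dataset/pq_dataset-1.4.7-py3-none-any.whl/pq_dataset/room_specific_config.py | setup_config
-- ===== SOURCE A (Python) =====
-- from typing import Dict, List
--
-- def setup_config(room_id: int) -> Dict[str, List[str]]:
--     """Setup room specific configuration
--
--     Config types
--     ------------
--     root_variable : string
--         Variable which may not be null - this might be redundant. Consider logging to check if this actually removes cases.
--     closed_ptype_variable : string
--         ptypeXc variables which are removed from data.
--     cpr_variable : string
--         Name of variable holding cpr.
--     room_specific_variables : List[str]
--         Individual variables which are relevant for the specific room - i.e. uni id for 729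
--     archive_variables : List[str]
--         List of variables storing information on archive ptypes
--     clients_query : string
--         Query string selecting only client area(s)
--     testarea_variables : List[str]
--         List of variables from which test areas should be removed
--
--
--     """
--
--     room_specific_config = {
--         'root_variable': {
--             491: ['background__ptype24'],
--             729: ['background__ptype1'],
--             2897: ['background__ptype3'],
--             999999: []
--         },
--         'closed_ptype_variable': {
--             491: ['background__ptype24c'],
--             729: ['background__ptype3c'],
--             2897: [],
--             999999: []
--         },
--         'cpr_variables': {
--             491: ['barnbg__cpr', 'barnbackground__cpr'],
--             729: ['barnbg__cpr', 'barnbackground__cpr'],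
--             2897: [],
--             999999: []
--         },
--         'room_specific_variables': {
--             491: ['daginstitutionbg__inr'],
--             729: ['skolebg__uni_id'],
--             2897: [],
--             999999: []
--         },
--         'consent_variables': {
--             491: ['barnbg__s_2', 'barnbg__s_5'],
--             729: [],
--             2897: [],
--             999999: []
--         },
--         'archive_variables': {
--             491: ['background__ptype220', 'background__ptype47', 'background__ptype221'],
--             729: ['background__ptype20', 'background__ptype33', 'background__ptype287'],
--             2897: [],
--             999999: []
--         },
--         'clients_query': {
--             491: ['(background__ptype65 == 7352477)'],
--             729: ['(background__ptype2 == 23318479 or background__ptype2 == 9523670 or background__ptype2 == 178975647)'],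
--             2897: ['(background__ptype2 == 181905908)'],
--             999999: []
--         },
--         'testarea_variables': {
--             491: ['background__ptype20t', 'background__ptype25t'],
--             729: ['background__ptype4t'],
--             2897: [],
--             999999: []
--         },
--         'municipality_variable': {
--             491: ['background__ptype24'],
--             729: ['background__ptype3'],
--             2897: ['background__ptype3'],
--             999999: []
--         }
--     }
--
--     config = {}
--
--     # Adding the room specific configuration
--     for key in room_specific_config:
--         config[key] = room_specific_config[key].get(room_id)
--
--     # Adding general configuration types
--     config['must_include_variables'] = ['respondent__created', 'respondent__closetime', 'respondent__respondentid']
--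
--     return config
-- ===== SOURCE B (Python) =====
-- from typing import Dict, List
--
-- _CONFIG_KEYS = [
--     'root_variable', 'closed_ptype_variable', 'cpr_variables',
--     'room_specific_variables', 'consent_variables', 'archive_variables',
--     'clients_query', 'testarea_variables', 'municipality_variable',
-- ]
--
-- # Same table as the original, transposed: keyed by room_id first.
-- _ROOM_RECORDS = {
--     491: {
--         'root_variable': ['background__ptype24'],
--         'closed_ptype_variable': ['background__ptype24c'],
--         'cpr_variables': ['barnbg__cpr', 'barnbackground__cpr'],
--         'room_specific_variables': ['daginstitutionbg__inr'],
--         'consent_variables': ['barnbg__s_2', 'barnbg__s_5'],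
--         'archive_variables': ['background__ptype220', 'background__ptype47', 'background__ptype221'],
--         'clients_query': ['(background__ptype65 == 7352477)'],
--         'testarea_variables': ['background__ptype20t', 'background__ptype25t'],
--         'municipality_variable': ['background__ptype24'],
--     },
--     729: {
--         'root_variable': ['background__ptype1'],
--         'closed_ptype_variable': ['background__ptype3c'],
--         'cpr_variables': ['barnbg__cpr', 'barnbackground__cpr'],
--         'room_specific_variables': ['skolebg__uni_id'],
--         'consent_variables': [],
--         'archive_variables': ['background__ptype20', 'background__ptype33', 'background__ptype287'],
--         'clients_query': ['(background__ptype2 == 23318479 or background__ptype2 == 9523670 or background__ptype2 == 178975647)'],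
--         'testarea_variables': ['background__ptype4t'],
--         'municipality_variable': ['background__ptype3'],
--     },
--     2897: {
--         'root_variable': ['background__ptype3'],
--         'closed_ptype_variable': [],
--         'cpr_variables': [],
--         'room_specific_variables': [],
--         'consent_variables': [],
--         'archive_variables': [],
--         'clients_query': ['(background__ptype2 == 181905908)'],
--         'testarea_variables': [],
--         'municipality_variable': ['background__ptype3'],
--     },
--     999999: {k: [] for k in _CONFIG_KEYS},
-- }
--
--
-- def setup_config(room_id: int) -> Dict[str, List[str]]:
--     """Setup room specific configuration (room-record lookup)."""
--     record = _ROOM_RECORDS.get(room_id)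
--     if record is None:
--         config = {key: None for key in _CONFIG_KEYS}
--     else:
--         config = dict(record)
--     config['must_include_variables'] = ['respondent__created', 'respondent__closetime', 'respondent__respondentid']
--     return config
-- ===== Notes on version B (the rewrite author's own statement) =====
-- stated objective: simpler
-- what changed: Transposed the constant table to be keyed by room_id first (one record per room), so the body is a single record lookup (with an all-None record for unknown ids) instead of a nine-iteration loop of per-key dict lookups.
import Mathlib
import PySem

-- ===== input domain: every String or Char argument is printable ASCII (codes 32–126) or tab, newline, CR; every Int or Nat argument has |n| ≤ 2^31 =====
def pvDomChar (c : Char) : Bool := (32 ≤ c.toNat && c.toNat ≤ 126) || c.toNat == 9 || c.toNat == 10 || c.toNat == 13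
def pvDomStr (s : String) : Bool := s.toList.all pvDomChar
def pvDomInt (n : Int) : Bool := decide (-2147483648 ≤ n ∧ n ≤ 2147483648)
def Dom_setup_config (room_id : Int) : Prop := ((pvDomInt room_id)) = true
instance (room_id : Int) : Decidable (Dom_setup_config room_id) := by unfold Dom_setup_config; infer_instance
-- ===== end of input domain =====

-- B transposes the constant table to be keyed by room_id (one full record per room),
-- replacing A's nine per-key inner-dict lookups by a single record lookup (objective: simpler).

-- ===== PORT A =====
-- A's nested table: config key ↦ (room_id ↦ value list)
def pvTableA : List (String × PySem.Dict Int (List String)) :=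
  [("root_variable", PySem.Dict.ofList
      [(491, ["background__ptype24"]), (729, ["background__ptype1"]),
       (2897, ["background__ptype3"]), (999999, [])]),
   ("closed_ptype_variable", PySem.Dict.ofList
      [(491, ["background__ptype24c"]), (729, ["background__ptype3c"]),
       (2897, []), (999999, [])]),
   ("cpr_variables", PySem.Dict.ofList
      [(491, ["barnbg__cpr", "barnbackground__cpr"]), (729, ["barnbg__cpr", "barnbackground__cpr"]),
       (2897, []), (999999, [])]),
   ("room_specific_variables", PySem.Dict.ofList
      [(491, ["daginstitutionbg__inr"]), (729, ["skolebg__uni_id"]),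
       (2897, []), (999999, [])]),
   ("consent_variables", PySem.Dict.ofList
      [(491, ["barnbg__s_2", "barnbg__s_5"]), (729, []),
       (2897, []), (999999, [])]),
   ("archive_variables", PySem.Dict.ofList
      [(491, ["background__ptype220", "background__ptype47", "background__ptype221"]),
       (729, ["background__ptype20", "background__ptype33", "background__ptype287"]),
       (2897, []), (999999, [])]),
   ("clients_query", PySem.Dict.ofList
      [(491, ["(background__ptype65 == 7352477)"]),
       (729, ["(background__ptype2 == 23318479 or background__ptype2 == 9523670 or background__ptype2 == 178975647)"]),
       (2897, ["(background__ptype2 == 181905908)"]), (999999, [])]),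
   ("testarea_variables", PySem.Dict.ofList
      [(491, ["background__ptype20t", "background__ptype25t"]), (729, ["background__ptype4t"]),
       (2897, []), (999999, [])]),
   ("municipality_variable", PySem.Dict.ofList
      [(491, ["background__ptype24"]), (729, ["background__ptype3"]),
       (2897, ["background__ptype3"]), (999999, [])])]

def setup_config (room_id : Int) : List (String × Option (List String)) :=
  -- for key in room_specific_config: config[key] = room_specific_config[key].get(room_id)
  let config : PySem.Dict String (Option (List String)) :=
    pvTableA.foldl (fun cfg kv => cfg.insert kv.1 (kv.2.get? room_id)) PySem.Dict.empty
  -- config['must_include_variables'] = [...]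
  (config.insert "must_include_variables"
    (some ["respondent__created", "respondent__closetime", "respondent__respondentid"])).items

-- ===== PORT B =====
def pvConfigKeys : List String :=
  ["root_variable", "closed_ptype_variable", "cpr_variables", "room_specific_variables",
   "consent_variables", "archive_variables", "clients_query", "testarea_variables",
   "municipality_variable"]

-- B's table, transposed: room_id ↦ full record of the nine config values
def pvRoomRecords : PySem.Dict Int (PySem.Dict String (List String)) :=
  PySem.Dict.ofList
    [(491, PySem.Dict.ofList
        [("root_variable", ["background__ptype24"]),
         ("closed_ptype_variable", ["background__ptype24c"]),
         ("cpr_variables", ["barnbg__cpr", "barnbackground__cpr"]),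
         ("room_specific_variables", ["daginstitutionbg__inr"]),
         ("consent_variables", ["barnbg__s_2", "barnbg__s_5"]),
         ("archive_variables", ["background__ptype220", "background__ptype47", "background__ptype221"]),
         ("clients_query", ["(background__ptype65 == 7352477)"]),
         ("testarea_variables", ["background__ptype20t", "background__ptype25t"]),
         ("municipality_variable", ["background__ptype24"])]),
     (729, PySem.Dict.ofList
        [("root_variable", ["background__ptype1"]),
         ("closed_ptype_variable", ["background__ptype3c"]),
         ("cpr_variables", ["barnbg__cpr", "barnbackground__cpr"]),
         ("room_specific_variables", ["skolebg__uni_id"]),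
         ("consent_variables", []),
         ("archive_variables", ["background__ptype20", "background__ptype33", "background__ptype287"]),
         ("clients_query", ["(background__ptype2 == 23318479 or background__ptype2 == 9523670 or background__ptype2 == 178975647)"]),
         ("testarea_variables", ["background__ptype4t"]),
         ("municipality_variable", ["background__ptype3"])]),
     (2897, PySem.Dict.ofList
        [("root_variable", ["background__ptype3"]),
         ("closed_ptype_variable", []),
         ("cpr_variables", []),
         ("room_specific_variables", []),
         ("consent_variables", []),
         ("archive_variables", []),
         ("clients_query", ["(background__ptype2 == 181905908)"]),
         ("testarea_variables", []),
         ("municipality_variable", ["background__ptype3"])]),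
     (999999, PySem.Dict.ofList (pvConfigKeys.map (fun k => (k, []))))]

def setup_config_alt (room_id : Int) : List (String × Option (List String)) :=
  let config : PySem.Dict String (Option (List String)) :=
    match pvRoomRecords.get? room_id with
    | some record => PySem.Dict.mk (record.items.map (fun p => (p.1, some p.2)))
    | none => PySem.Dict.mk (pvConfigKeys.map (fun k => (k, none)))
  (config.insert "must_include_variables"
    (some ["respondent__created", "respondent__closetime", "respondent__respondentid"])).items

-- ===== PRECONDITION & SPEC =====
def Spec_setup_config (room_id : Int) (out : List (String × Option (List String))) : Prop := out = setup_config_alt room_id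
instance (room_id : Int) (out : List (String × Option (List String))) : Decidable (Spec_setup_config room_id out) := by unfold Spec_setup_config; infer_instance

-- ===== CLAIM (what is proved, stated in full; the proofs are below) =====
def Claim_equal_setup_config : Prop := ∀ (room_id : Int), Dom_setup_config room_id → Spec_setup_config room_id (setup_config room_id)

-- ===== LEMMAS AND PROOFS =====
theorem setup_config_eq_default (room_id : Int)
    (h1 : room_id ≠ 491) (h2 : room_id ≠ 729) (h3 : room_id ≠ 2897) (h4 : room_id ≠ 999999) :
    setup_config room_id = setup_config_alt room_id := by
  have e1 : ((491 : Int) == room_id) = false := by simp [Ne.symm h1]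
  have e2 : ((729 : Int) == room_id) = false := by simp [Ne.symm h2]
  have e3 : ((2897 : Int) == room_id) = false := by simp [Ne.symm h3]
  have e4 : ((999999 : Int) == room_id) = false := by simp [Ne.symm h4]
  simp [setup_config, setup_config_alt, pvTableA, pvRoomRecords, pvConfigKeys,
    PySem.Dict.ofList, PySem.Dict.update, PySem.Dict.get?, PySem.Dict.insert,
    PySem.Dict.contains, PySem.Dict.empty, List.find?,
    e1, e2, e3, e4]

-- ===== VERDICT (by name: the statement is the Claim_ definition above) =====
theorem setup_config_spec : Claim_equal_setup_config := by
  intro room_id _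
  unfold Spec_setup_config
  by_cases h1 : room_id = 491
  · subst h1; decide
  · by_cases h2 : room_id = 729
    · subst h2; decide
    · by_cases h3 : room_id = 2897
      · subst h3; decide
      · by_cases h4 : room_id = 999999
        · subst h4; decide
        · exact setup_config_eq_default room_id h1 h2 h3 h4
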